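-- pv_equiv track=rewrite | github.com/gdennen0/EchoZero | ui/qt_gui/widgets/timeline/core/widget.py | _snap_to_nice_divisor
-- ===== SOURCE A (Python) =====
-- def _snap_to_nice_divisor(n: int) -> int:
--     """Snap to musically/temporally meaningful divisors (POC-verified)."""
--     if n <= 1:
--         return 1
--     nice = [1, 2, 3, 4, 5, 6, 8, 10, 12, 15, 16, 20, 24, 25, 30, 32, 40, 48, 50, 60, 64, 100]
--     for v in nice:
--         if v >= n:
--             return v
--     return n
-- ===== SOURCE B (Python) =====
-- _NICE = (1, 2, 3, 4, 5, 6, 8, 10, 12,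
--          15, 16, 20, 24, 25, 30, 32,
--          40, 48, 50, 60, 64, 100)
--
-- def _snap_to_nice_divisor(n: int) -> int:
--     # Binary search (bisect_left) for the first nice divisor >= n.
--     if n <= 1:
--         return 1
--     lo, hi = 0, len(_NICE)
--     while lo < hi:
--         mid = (lo + hi) // 2
--         if _NICE[mid] < n:
--             lo = mid + 1
--         else:
--             hi = mid
--     return _NICE[lo] if lo < len(_NICE) else n
-- ===== Notes on version B (the rewrite author's own statement) =====
-- stated objective: alternative
-- what changed: Replaces the linear scan over the fixed divisor list with a hand-rolled bisect_left binary search that locates the first divisor >= n, falling back to n past the last entry.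
import Mathlib
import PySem

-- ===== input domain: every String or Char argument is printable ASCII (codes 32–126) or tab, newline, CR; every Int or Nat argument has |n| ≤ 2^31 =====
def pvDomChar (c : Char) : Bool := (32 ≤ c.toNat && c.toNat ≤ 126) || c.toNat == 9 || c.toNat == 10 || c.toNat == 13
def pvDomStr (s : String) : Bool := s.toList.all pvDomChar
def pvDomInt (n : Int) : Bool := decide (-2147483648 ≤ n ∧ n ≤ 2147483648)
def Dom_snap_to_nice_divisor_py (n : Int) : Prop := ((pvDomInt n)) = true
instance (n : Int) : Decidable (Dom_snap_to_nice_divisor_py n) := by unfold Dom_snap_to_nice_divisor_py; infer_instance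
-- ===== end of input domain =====

-- ===== PORT A =====
-- B replaces A's linear scan of the fixed divisor list with a bisect_left binary search (alternative decomposition, same cost class).

-- for v in nice: if v >= n: return v  -- else fall through to n
def pvScanA (n : Int) : List Int → Int
  | [] => n
  | v :: rest => if v ≥ n then v else pvScanA n rest

def snap_to_nice_divisor_py (n : Int) : Int :=
  if n ≤ 1 then 1
  else pvScanA n [1, 2, 3, 4, 5, 6, 8, 10, 12, 15, 16, 20, 24, 25, 30, 32, 40, 48, 50, 60, 64, 100]

-- ===== PORT B =====
-- bisect_left loop: fuel = hi - lo suffices since hi - lo strictly decreases each iteration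
def pvBisectLeft (a : List Int) (x : Int) : Nat → Nat → Nat → Nat
  | 0, lo, _ => lo
  | fuel + 1, lo, hi =>
    if lo < hi then
      let mid := (lo + hi) / 2
      if a.getD mid 0 < x then pvBisectLeft a x fuel (mid + 1) hi
      else pvBisectLeft a x fuel lo mid
    else lo

def snap_to_nice_divisor_py_alt (n : Int) : Int :=
  if n ≤ 1 then 1
  else
    let nice : List Int := [1, 2, 3, 4, 5, 6, 8, 10, 12, 15, 16, 20, 24, 25, 30, 32, 40, 48, 50, 60, 64, 100]
    let lo := pvBisectLeft nice n nice.length 0 nice.length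
    if lo < nice.length then nice.getD lo 0 else n

-- ===== PRECONDITION & SPEC =====
def Spec_snap_to_nice_divisor_py (n : Int) (out : Int) : Prop := out = snap_to_nice_divisor_py_alt n
instance (n : Int) (out : Int) : Decidable (Spec_snap_to_nice_divisor_py n out) := by unfold Spec_snap_to_nice_divisor_py; infer_instance

-- ===== CLAIM (what is proved, stated in full; the proofs are below) =====
def Claim_equal_snap_to_nice_divisor_py : Prop := ∀ (n : Int), Dom_snap_to_nice_divisor_py n → Spec_snap_to_nice_divisor_py n (snap_to_nice_divisor_py n)

-- ===== LEMMAS AND PROOFS =====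
theorem pv_scan_lt (n : Int) : ∀ l : List Int, (∀ v ∈ l, v < n) → pvScanA n l = n
  | [], _ => rfl
  | v :: rest, h => by
    rw [pvScanA, if_neg (by have := h v (List.mem_cons_self ..); omega)]
    exact pv_scan_lt n rest (fun w hw => h w (List.mem_cons_of_mem _ hw))

theorem pv_bisect_all_lt (a : List Int) (x : Int) :
    ∀ fuel lo hi, lo ≤ hi → hi - lo ≤ fuel →
      (∀ i, lo ≤ i → i < hi → a.getD i 0 < x) →
      pvBisectLeft a x fuel lo hi = hi
  | 0, lo, hi, h1, h2, _ => by
    rw [pvBisectLeft]; omega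
  | fuel + 1, lo, hi, h1, h2, hall => by
    rw [pvBisectLeft]
    split_ifs with hlt
    · rw [if_pos (hall ((lo + hi) / 2) (by omega) (by omega))]
      exact pv_bisect_all_lt a x fuel ((lo + hi) / 2 + 1) hi (by omega) (by omega)
        (fun i hi1 hi2 => hall i (by omega) hi2)
    · omega

theorem pv_big (n : Int) (h : 100 < n) :
    snap_to_nice_divisor_py n = snap_to_nice_divisor_py_alt n := by
  rw [snap_to_nice_divisor_py, snap_to_nice_divisor_py_alt, if_neg (by omega), if_neg (by omega)]
  show pvScanA n _ = if pvBisectLeft _ n 22 0 22 < 22 then _ else n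
  rw [pv_bisect_all_lt _ n 22 0 22 (by omega) (by omega)
      (fun i _ h2 => by interval_cases i <;> simp [List.getD] <;> omega),
    if_neg (by omega),
    pv_scan_lt n _ (fun v hv => by fin_cases hv <;> omega)]

-- ===== VERDICT (by name: the statement is the Claim_ definition above) =====
theorem snap_to_nice_divisor_py_spec : Claim_equal_snap_to_nice_divisor_py := by
  intro n _
  unfold Spec_snap_to_nice_divisor_py
  by_cases hs : n ≤ 1
  · simp [snap_to_nice_divisor_py, snap_to_nice_divisor_py_alt, hs]
  · by_cases hb : n ≤ 100
    · interval_cases n <;> decide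
    · exact pv_big n (by omega)
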